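-- pv_equiv track=rewrite | github.com/chu-he/rosalind | 057_REAR/REAR.py | swap_any_increasing_strip
-- ===== SOURCE A (Python) =====
-- def swap(list, indexFrom, indexTo):
--     result = []
--     #result.extend(list[:indexFrom])
--     #result.extend(list[indexFrom:indexTo+1][::-1])
--     #result.extend(list[indexTo+1:])
--     return list[:indexFrom] + list[indexFrom:indexTo+1][::-1] + list[indexTo+1:]
--
-- def swap_any_increasing_strip(list):
--     strip_start = None
--     strip_end   = None
--     for i in range(len(list)-1):
--         if strip_start == None:
--             if list[i+1] - list[i] == 1:
--                 strip_start = i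
--         else:
--             if list[i+1] - list[i] != 1:
--                 strip_end = i
--                 # Ignore the increasing strip if it's a placed 0 at 0 position
--                 if strip_start == 0 and list[0] == 0:
--                     strip_start = None
--                     strip_end   = None
--                 else:
--                     return swap(list, strip_start, strip_end)
-- ===== SOURCE B (Python) =====
-- def swap_any_increasing_strip(list):
--     n = len(list)
--     # Phase 1: index all maximal increasing-by-1 runs as (start, last, closed)
--     runs = []
--     i = 0
--     while i < n - 1:
--         if list[i + 1] - list[i] == 1:
--             j = i + 1
--             while j < n - 1 and list[j + 1] - list[j] == 1:
--                 j += 1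
--             runs.append((i, j, j < n - 1))
--             i = j
--         else:
--             i += 1
--     # Phase 2: pick the first closed run, skipping a run of a placed 0 at position 0
--     for (s, e, closed) in runs:
--         if s == 0 and list[0] == 0:
--             continue
--         if closed:
--             return list[:s] + list[s:e + 1][::-1] + list[e + 1:]
--     return None
-- ===== Notes on version B (the rewrite author's own statement) =====
-- stated objective: alternative
-- what changed: Replaces A's single-pass early-return state machine (Option strip_start threaded through the loop) with a two-phase shape: first index all maximal increasing-by-1 runs as (start, last, closed) records, then select the first closed run, skipping a run of a placed 0 at position 0.
import Mathlib
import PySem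

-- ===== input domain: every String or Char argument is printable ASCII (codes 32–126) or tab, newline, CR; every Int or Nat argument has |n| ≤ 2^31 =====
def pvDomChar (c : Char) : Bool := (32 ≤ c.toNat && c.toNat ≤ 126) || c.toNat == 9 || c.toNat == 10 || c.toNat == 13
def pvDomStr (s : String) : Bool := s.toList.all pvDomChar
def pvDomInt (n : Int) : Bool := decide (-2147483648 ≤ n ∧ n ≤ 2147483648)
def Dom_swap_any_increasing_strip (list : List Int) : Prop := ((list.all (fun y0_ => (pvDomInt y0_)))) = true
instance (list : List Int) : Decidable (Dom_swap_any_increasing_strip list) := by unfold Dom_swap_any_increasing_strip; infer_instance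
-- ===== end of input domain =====

-- B replaces A's early-return state machine with a run-index-then-select decomposition (alternative, same cost).

-- ===== PORT A =====
-- helper 'swap' of A: list[:indexFrom] + list[indexFrom:indexTo+1][::-1] + list[indexTo+1:]
-- ([::-1] of a list is its reversal, ported as .reverse)
def pvSwapA (l : List Int) (indexFrom indexTo : Int) : List Int :=
  PySem.List.slice l none (some indexFrom)
    ++ (PySem.List.slice l (some indexFrom) (some (indexTo + 1))).reverse
    ++ PySem.List.slice l (some (indexTo + 1)) none

-- the for-loop of A: i counts up through range(len(list)-1), strip_start is the Option state.
-- list indexing is always in range here (i+1 ≤ len-1), so list[k] is ported as getD k 0 (exact in range).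
def pvLoopA (l : List Int) (i : Nat) (strip_start : Option Nat) : Option (List Int) :=
  if _h : i < l.length - 1 then
    match strip_start with
    | none =>
      if l.getD (i + 1) 0 - l.getD i 0 = 1 then pvLoopA l (i + 1) (some i)
      else pvLoopA l (i + 1) none
    | some s =>
      if l.getD (i + 1) 0 - l.getD i 0 ≠ 1 then
        -- strip_end = i; ignore the strip if it's a placed 0 at 0 position
        if s = 0 ∧ l.getD 0 0 = 0 then pvLoopA l (i + 1) none
        else some (pvSwapA l (Int.ofNat s) (Int.ofNat i))
      else pvLoopA l (i + 1) (some s)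
  else none
termination_by l.length - i
decreasing_by all_goals exact Nat.sub_succ_lt_self l.length i (lt_of_lt_of_le _h (Nat.sub_le l.length 1))

def swap_any_increasing_strip (list : List Int) : Option (List Int) :=
  pvLoopA list 0 none

-- ===== PORT B =====
-- inner while of phase 1: extend j while j < n-1 and list[j+1]-list[j] == 1
def pvExtend (l : List Int) (j : Nat) : Nat :=
  if _h : j < l.length - 1 ∧ l.getD (j + 1) 0 - l.getD j 0 = 1 then pvExtend l (j + 1) else j
termination_by l.length - j
decreasing_by exact Nat.sub_succ_lt_self l.length j (lt_of_lt_of_le _h.1 (Nat.sub_le l.length 1))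

-- outer while of phase 1: collect maximal runs as (start, last, closed).
-- fuel is only a totality guard for the index jump i := j; called with fuel = l.length, which is enough
def pvRunsFrom (l : List Int) : Nat → Nat → List (Nat × Nat × Bool)
  | 0, _ => []
  | fuel + 1, i =>
    if i < l.length - 1 then
      if l.getD (i + 1) 0 - l.getD i 0 = 1 then
        let j := pvExtend l (i + 1)
        (i, j, decide (j < l.length - 1)) :: pvRunsFrom l fuel j
      else pvRunsFrom l fuel (i + 1)
    else []

-- phase 2: first closed run, skipping a run of a placed 0 at position 0
def pvSelect (l : List Int) : List (Nat × Nat × Bool) → Option (List Int)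
  | [] => none
  | (s, e, closed) :: rest =>
    if s = 0 ∧ l.getD 0 0 = 0 then pvSelect l rest
    else if closed then
      some (PySem.List.slice l none (some (Int.ofNat s))
        ++ (PySem.List.slice l (some (Int.ofNat s)) (some (Int.ofNat e + 1))).reverse
        ++ PySem.List.slice l (some (Int.ofNat e + 1)) none)
    else pvSelect l rest

def swap_any_increasing_strip_alt (list : List Int) : Option (List Int) :=
  pvSelect list (pvRunsFrom list list.length 0)

-- ===== PRECONDITION & SPEC =====
def Spec_swap_any_increasing_strip (list : List Int) (out : Option (List Int)) : Prop := out = swap_any_increasing_strip_alt list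
instance (list : List Int) (out : Option (List Int)) : Decidable (Spec_swap_any_increasing_strip list out) := by unfold Spec_swap_any_increasing_strip; infer_instance

-- ===== CLAIM (what is proved, stated in full; the proofs are below) =====
def Claim_equal_swap_any_increasing_strip : Prop := ∀ (list : List Int), Dom_swap_any_increasing_strip list → Spec_swap_any_increasing_strip list (swap_any_increasing_strip list)

-- ===== LEMMAS AND PROOFS =====

-- one-step unfoldings of pvExtend
theorem pvExtend_step (l : List Int) (j : Nat) (hj : j < l.length - 1)
    (hd : l.getD (j + 1) 0 - l.getD j 0 = 1) : pvExtend l j = pvExtend l (j + 1) := by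
  rw [pvExtend, dif_pos (And.intro hj hd)]

theorem pvExtend_stay (l : List Int) (j : Nat)
    (h : ¬(j < l.length - 1 ∧ l.getD (j + 1) 0 - l.getD j 0 = 1)) : pvExtend l j = j := by
  rw [pvExtend, dif_neg h]

theorem pvExtend_ge (l : List Int) (j : Nat) : j ≤ pvExtend l j := by
  by_cases h : j < l.length - 1 ∧ l.getD (j + 1) 0 - l.getD j 0 = 1
  · rw [pvExtend_step l j h.1 h.2]
    exact le_trans (Nat.le_succ j) (pvExtend_ge l (j + 1))
  · rw [pvExtend_stay l j h]
termination_by l.length - j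

-- where pvExtend stops before the end, the run really ends there
theorem pvExtend_stop (l : List Int) (j : Nat) :
    pvExtend l j < l.length - 1 →
    l.getD (pvExtend l j + 1) 0 - l.getD (pvExtend l j) 0 ≠ 1 := by
  by_cases h : j < l.length - 1 ∧ l.getD (j + 1) 0 - l.getD j 0 = 1
  · rw [pvExtend_step l j h.1 h.2]
    exact pvExtend_stop l (j + 1)
  · rw [pvExtend_stay l j h]
    intro hlt h1
    exact h (And.intro hlt h1)
termination_by l.length - j

-- with enough fuel, one more unit of fuel changes nothing
theorem pvRunsFrom_succ (l : List Int) (f i : Nat) (hf : l.length - 1 ≤ f + i) :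
    pvRunsFrom l (f + 1) i = pvRunsFrom l f i := by
  induction f generalizing i with
  | zero =>
    show pvRunsFrom l 1 i = pvRunsFrom l 0 i
    rw [pvRunsFrom, pvRunsFrom, if_neg (by omega)]
  | succ f ih =>
    rw [pvRunsFrom]
    conv_rhs => rw [pvRunsFrom]
    by_cases hi : i < l.length - 1
    · rw [if_pos hi, if_pos hi]
      by_cases hd : l.getD (i + 1) 0 - l.getD i 0 = 1
      · rw [if_pos hd, if_pos hd]
        have hji : i + 1 ≤ pvExtend l (i + 1) := pvExtend_ge l (i + 1)
        show (i, pvExtend l (i + 1), decide (pvExtend l (i + 1) < l.length - 1)) ::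
            pvRunsFrom l (f + 1) (pvExtend l (i + 1)) =
          (i, pvExtend l (i + 1), decide (pvExtend l (i + 1) < l.length - 1)) ::
            pvRunsFrom l f (pvExtend l (i + 1))
        exact congrArg _ (ih (pvExtend l (i + 1)) (by omega))
      · rw [if_neg hd, if_neg hd, ih (i + 1) (by omega)]
    · rw [if_neg hi, if_neg hi]

-- mid-run state of A's loop, characterised by pvExtend
theorem pvLoopA_some (l : List Int) (i s : Nat) :
    pvLoopA l i (some s) =
      (if pvExtend l i < l.length - 1 then
        (if s = 0 ∧ l.getD 0 0 = 0 then pvLoopA l (pvExtend l i + 1) none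
         else some (pvSwapA l (Int.ofNat s) (Int.ofNat (pvExtend l i))))
       else none) := by
  by_cases hi : i < l.length - 1
  · by_cases hd : l.getD (i + 1) 0 - l.getD i 0 = 1
    · conv_lhs => rw [pvLoopA]
      simp only [dif_pos hi, if_neg (not_not_intro hd)]
      rw [pvExtend_step l i hi hd]
      exact pvLoopA_some l (i + 1) s
    · conv_lhs => rw [pvLoopA]
      simp only [dif_pos hi, if_pos hd]
      rw [pvExtend_stay l i (by tauto), if_pos hi]
  · conv_lhs => rw [pvLoopA]
    simp only [dif_neg hi]
    rw [pvExtend_stay l i (by tauto), if_neg (by omega)]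
termination_by l.length - i
decreasing_by exact Nat.sub_succ_lt_self l.length i (lt_of_lt_of_le hi (Nat.sub_le l.length 1))

-- scanning state of A's loop = select over B's run table (fuel adequate)
theorem pvLoopA_none (l : List Int) (f i : Nat) (hf : l.length - 1 ≤ f + i) :
    pvLoopA l i none = pvSelect l (pvRunsFrom l f i) := by
  induction f generalizing i with
  | zero =>
    rw [pvLoopA, dif_neg (by omega)]
    rfl
  | succ f ih =>
    rw [pvRunsFrom]
    by_cases hi : i < l.length - 1
    · rw [if_pos hi]
      by_cases hd : l.getD (i + 1) 0 - l.getD i 0 = 1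
      · rw [if_pos hd]
        conv_lhs => rw [pvLoopA]
        simp only [dif_pos hi, if_pos hd]
        rw [pvLoopA_some l (i + 1) i]
        set j := pvExtend l (i + 1) with hj
        have hji : i + 1 ≤ j := pvExtend_ge l (i + 1)
        by_cases hjlt : j < l.length - 1
        · rw [if_pos hjlt]
          by_cases hskip : i = 0 ∧ l.getD 0 0 = 0
          · rw [if_pos hskip, ih (j + 1) (by omega)]
            have hstop := pvExtend_stop l (i + 1)
            rw [← hj] at hstop
            have hrj : pvRunsFrom l f j = pvRunsFrom l f (j + 1) := by
              obtain ⟨f', rfl⟩ : ∃ f', f = f' + 1 := ⟨f - 1, by omega⟩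
              rw [pvRunsFrom, if_pos hjlt, if_neg (hstop hjlt)]
              exact (pvRunsFrom_succ l f' (j + 1) (by omega)).symm
            simp only [pvSelect, if_pos hskip, hrj]
          · rw [if_neg hskip]
            simp only [pvSelect, if_neg hskip, decide_eq_true hjlt]
            rw [if_pos trivial]
            rfl
        · rw [if_neg hjlt]
          have hrj : pvRunsFrom l f j = [] := by
            cases f with
            | zero => rfl
            | succ f' => rw [pvRunsFrom, if_neg hjlt]
          by_cases hskip : i = 0 ∧ l.getD 0 0 = 0
          · simp only [pvSelect, if_pos hskip, hrj]
          · have hcl : decide (j < l.length - 1) = false := by simp [hjlt]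
            simp only [pvSelect, if_neg hskip, hcl, Bool.false_eq_true, if_false, hrj]
      · rw [if_neg hd]
        conv_lhs => rw [pvLoopA]
        simp only [dif_pos hi, if_neg hd]
        exact ih (i + 1) (by omega)
    · rw [if_neg hi, pvLoopA, dif_neg hi]
      rfl

-- ===== VERDICT (by name: the statement is the Claim_ definition above) =====
theorem swap_any_increasing_strip_spec : Claim_equal_swap_any_increasing_strip := by
  intro l _
  show swap_any_increasing_strip l = swap_any_increasing_strip_alt l
  unfold swap_any_increasing_strip swap_any_increasing_strip_alt
  exact pvLoopA_none l l.length 0 (by omega)
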